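-- pv_equiv track=rewrite | github.com/sebstemmer/sulvedoku | grid.py | get_coords_in_square_of_coord
-- ===== SOURCE A (Python) =====
-- from typing import NamedTuple, Optional
--
-- class Coord(NamedTuple):
--     row_idx: int
--     col_idx: int
--
-- def get_coords_in_square(square_idx: int) -> list[Coord]:
--     if not (0 <= square_idx <= 8):
--         raise ValueError(f"{square_idx} must be between 0 and 8")
--
--     square_row_idx = square_idx // 3
--     square_col_idx = square_idx % 3
--
--     return [
--         Coord(
--             row_idx=row_idx,
--             col_idx=col_idx
--         ) for row_idx in range(
--             3 * square_row_idx,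
--             3 * square_row_idx + 3
--         ) for col_idx in range(
--             3 * square_col_idx,
--             3 * square_col_idx + 3
--         )
--     ]
--
-- def get_coords_in_square_of_coord(
--     coord: Coord
--
--
-- ) -> list[Coord]:
--     for square_idx in range(0, 9):
--         coords_in_square: list[Coord] = get_coords_in_square(
--             square_idx=square_idx
--         )
--         if coord in coords_in_square:
--             return coords_in_square
--
--     raise ValueError(
--         f"square_idx not found for {coord}"
--     )
-- ===== SOURCE B (Python) =====
-- from typing import NamedTuple
--
-- class Coord(NamedTuple):
--     row_idx: int
--     col_idx: int
--
-- def get_coords_in_square(square_idx: int) -> list[Coord]: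
--     if not (0 <= square_idx <= 8):
--         raise ValueError(f"{square_idx} must be between 0 and 8")
--
--     square_row_idx = square_idx // 3
--     square_col_idx = square_idx % 3
--
--     return [
--         Coord(row_idx=row_idx, col_idx=col_idx)
--         for row_idx in range(3 * square_row_idx, 3 * square_row_idx + 3)
--         for col_idx in range(3 * square_col_idx, 3 * square_col_idx + 3)
--     ]
--
-- def get_coords_in_square_of_coord(coord: Coord) -> list[Coord]:
--     row_idx, col_idx = coord
--     if not (0 <= row_idx <= 8 and 0 <= col_idx <= 8):
--         raise ValueError(f"square_idx not found for {coord}")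
--     return get_coords_in_square(square_idx=(row_idx // 3) * 3 + col_idx // 3)
-- ===== Notes on version B (the rewrite author's own statement) =====
-- stated objective: faster
-- what changed: B computes the square index directly by arithmetic ((row//3)*3 + col//3) after one bounds check, instead of generating all nine 3x3 squares and linearly searching for one that contains the coordinate.
import Mathlib
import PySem

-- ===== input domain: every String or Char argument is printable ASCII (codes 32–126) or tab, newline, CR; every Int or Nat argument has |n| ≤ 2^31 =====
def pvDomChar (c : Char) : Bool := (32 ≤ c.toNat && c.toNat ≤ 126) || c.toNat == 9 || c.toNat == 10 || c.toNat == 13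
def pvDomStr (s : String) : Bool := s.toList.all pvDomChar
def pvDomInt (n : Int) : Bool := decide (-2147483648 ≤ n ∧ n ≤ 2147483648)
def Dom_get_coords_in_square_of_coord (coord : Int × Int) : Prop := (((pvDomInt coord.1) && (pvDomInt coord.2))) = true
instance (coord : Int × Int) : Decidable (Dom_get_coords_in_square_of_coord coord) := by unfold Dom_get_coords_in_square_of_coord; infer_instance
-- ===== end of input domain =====

-- B replaces A's linear scan over all nine 3x3 squares by a direct arithmetic
-- computation of the square index (constant-factor faster). Equivalence on in-range
-- coords; both raise ValueError outside (excluded by Pre_).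

-- ===== PORT A =====
-- helper get_coords_in_square: its 0..8 guard never fires for the square_idx 0..8
-- produced by A's loop, so only the comprehension is ported.
def pyGetCoordsInSquare (square_idx : Int) : List (Int × Int) :=
  let square_row_idx := PySem.Int.floordiv square_idx 3
  let square_col_idx := PySem.Int.mod square_idx 3
  (PySem.List.pyRange (3 * square_row_idx) (3 * square_row_idx + 3) 1).flatMap
    (fun row_idx =>
      (PySem.List.pyRange (3 * square_col_idx) (3 * square_col_idx + 3) 1).map
        (fun col_idx => (row_idx, col_idx)))

-- A's for-loop over range(0, 9): return the first square list containing coord;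
-- the final `raise ValueError` (loop exhausted) is outside Pre_ ([] here).
def pyScanSquares (coord : Int × Int) : List Int → List (Int × Int)
  | [] => []
  | square_idx :: rest =>
    let coords_in_square := pyGetCoordsInSquare square_idx
    if coord ∈ coords_in_square then coords_in_square
    else pyScanSquares coord rest

def get_coords_in_square_of_coord (coord : Int × Int) : List (Int × Int) :=
  pyScanSquares coord (PySem.List.pyRange 0 9 1)

-- ===== PORT B =====
-- B raises ValueError on out-of-range coords (outside Pre_); [] there in the port.
def get_coords_in_square_of_coord_alt (coord : Int × Int) : List (Int × Int) :=
  if 0 ≤ coord.1 ∧ coord.1 ≤ 8 ∧ 0 ≤ coord.2 ∧ coord.2 ≤ 8 then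
    pyGetCoordsInSquare ((PySem.Int.floordiv coord.1 3) * 3 + PySem.Int.floordiv coord.2 3)
  else []

-- ===== PRECONDITION & SPEC =====
-- A raises ValueError exactly when the coordinate is outside the 9x9 board.
def Pre_get_coords_in_square_of_coord (coord : Int × Int) : Prop :=
  0 ≤ coord.1 ∧ coord.1 ≤ 8 ∧ 0 ≤ coord.2 ∧ coord.2 ≤ 8
instance (coord : Int × Int) : Decidable (Pre_get_coords_in_square_of_coord coord) := by
  unfold Pre_get_coords_in_square_of_coord; infer_instance
def pvWitness_get_coords_in_square_of_coord : (Int × Int) := (4, 5)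

def Spec_get_coords_in_square_of_coord (coord : Int × Int) (out : List (Int × Int)) : Prop := out = get_coords_in_square_of_coord_alt coord
instance (coord : Int × Int) (out : List (Int × Int)) : Decidable (Spec_get_coords_in_square_of_coord coord out) := by unfold Spec_get_coords_in_square_of_coord; infer_instance

-- ===== CLAIM (what is proved, stated in full; the proofs are below) =====
def Claim_equal_get_coords_in_square_of_coord : Prop := ∀ (coord : Int × Int), Dom_get_coords_in_square_of_coord coord → Pre_get_coords_in_square_of_coord coord → Spec_get_coords_in_square_of_coord coord (get_coords_in_square_of_coord coord)

-- ===== LEMMAS AND PROOFS =====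

-- ===== VERDICT (by name: the statement is the Claim_ definition above) =====
theorem get_coords_in_square_of_coord_spec : Claim_equal_get_coords_in_square_of_coord := by
  intro ⟨r, c⟩ _ hpre
  obtain ⟨h1, h2, h3, h4⟩ := hpre
  unfold Spec_get_coords_in_square_of_coord
  interval_cases r <;> interval_cases c <;> decide
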